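-- pv_equiv track=rewrite | github.com/wjh4sg/hello_rag_agent | evaluation/run_project_eval.py | find_source_ranks
-- ===== SOURCE A (Python) =====
-- def find_source_ranks(actual_sources: list[str], expected_sources: tuple[str, ...]) -> list[int]:
--     if not expected_sources:
--         return []
--     ranks: list[int] = []
--     for index, source in enumerate(actual_sources, start=1):
--         if source in expected_sources:
--             ranks.append(index)
--     return ranks
-- ===== SOURCE B (Python) =====
-- def find_source_ranks(actual_sources: list[str], expected_sources: tuple[str, ...]) -> list[int]:
--     positions: dict[str, list[int]] = {}
--     for index, source in enumerate(actual_sources, start=1):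
--         positions.setdefault(source, []).append(index)
--     ranks: list[int] = []
--     for source in dict.fromkeys(expected_sources):
--         if source in positions:
--             ranks.extend(positions[source])
--     ranks.sort()
--     return ranks
-- ===== Notes on version B (the rewrite author's own statement) =====
-- stated objective: faster
-- what changed: Instead of scanning actual_sources with a linear membership test against expected_sources, B builds an inverted index from each source to its 1-based positions in one pass, gathers the stored positions of the distinct expected sources, and sorts the result.
import Mathlib
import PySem

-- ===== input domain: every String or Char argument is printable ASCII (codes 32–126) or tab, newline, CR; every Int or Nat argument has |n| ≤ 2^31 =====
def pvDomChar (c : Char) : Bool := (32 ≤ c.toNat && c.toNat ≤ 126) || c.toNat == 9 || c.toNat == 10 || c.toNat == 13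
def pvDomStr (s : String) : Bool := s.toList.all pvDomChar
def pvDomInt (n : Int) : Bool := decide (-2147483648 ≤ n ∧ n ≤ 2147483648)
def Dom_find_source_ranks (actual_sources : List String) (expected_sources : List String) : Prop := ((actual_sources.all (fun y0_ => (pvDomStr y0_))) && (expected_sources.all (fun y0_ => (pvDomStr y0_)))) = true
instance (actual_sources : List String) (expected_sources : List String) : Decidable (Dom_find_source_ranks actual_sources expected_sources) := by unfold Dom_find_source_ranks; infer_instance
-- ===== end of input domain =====

-- B replaces A's scan-with-membership-test by an inverted index (source → 1-based positions),
-- gathers the positions of the distinct expected sources and sorts; alternative decomposition, same results.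

-- ===== PORT A =====
def find_source_ranks (actual_sources : List String) (expected_sources : List String) : List Int :=
  if expected_sources = [] then []
  else
    (PySem.List.enumerate actual_sources 1).foldl
      (fun ranks p => if expected_sources.contains p.2 then ranks ++ [p.1] else ranks) []

-- ===== PORT B =====
def find_source_ranks_alt (actual_sources : List String) (expected_sources : List String) : List Int :=
  let positions : PySem.Dict String (List Int) :=
    (PySem.List.enumerate actual_sources 1).foldl
      (fun d p => d.modify p.2 [] (fun l => l ++ [p.1])) PySem.Dict.empty
  let ranks : List Int :=
    (PySem.List.dedup expected_sources).foldl
      (fun r s => match positions.get? s with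
        | some v => r ++ v
        | none => r) []
  PySem.List.sorted ranks (fun x => x) false

-- ===== PRECONDITION & SPEC =====
def Spec_find_source_ranks (actual_sources : List String) (expected_sources : List String) (out : List Int) : Prop := out = find_source_ranks_alt actual_sources expected_sources
instance (actual_sources : List String) (expected_sources : List String) (out : List Int) : Decidable (Spec_find_source_ranks actual_sources expected_sources out) := by unfold Spec_find_source_ranks; infer_instance

-- ===== CLAIM (what is proved, stated in full; the proofs are below) =====
def Claim_equal_find_source_ranks : Prop := ∀ (actual_sources : List String) (expected_sources : List String), Dom_find_source_ranks actual_sources expected_sources → Spec_find_source_ranks actual_sources expected_sources (find_source_ranks actual_sources expected_sources)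

-- ===== LEMMAS AND PROOFS =====

-- flatMap over a Nodup list of a "cons i at x" family: i surfaces once iff x is in the list
theorem pv_flatMap_cons_at (D : List String) (hD : D.Nodup) (x : String) (i : Int)
    (g : String → List Int) :
    (D.flatMap (fun s => if x = s then i :: g s else g s)).Perm
      (if x ∈ D then i :: D.flatMap g else D.flatMap g) := by
  induction D with
  | nil => simp
  | cons s D' ih =>
    rcases List.nodup_cons.mp hD with ⟨hs, hD'⟩
    by_cases hxs : x = s
    · subst hxs
      have hcongr : D'.flatMap (fun t => if x = t then i :: g t else g t) = D'.flatMap g := by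
        apply List.flatMap_congr
        intro t ht
        have hne : x ≠ t := fun h => hs (h ▸ ht)
        simp [hne]
      rw [List.flatMap_cons, hcongr, if_pos (List.mem_cons_self), if_pos rfl]
      simp
    · by_cases hmem : x ∈ D'
      · have hih := ih hD'
        rw [if_pos hmem] at hih
        have h1 : (g s ++ D'.flatMap (fun t => if x = t then i :: g t else g t)).Perm
            (g s ++ (i :: D'.flatMap g)) := List.Perm.append_left _ hih
        have h2 : (g s ++ (i :: D'.flatMap g)).Perm (i :: (g s ++ D'.flatMap g)) :=
          List.perm_middle
        rw [List.flatMap_cons, if_neg hxs, if_pos (List.mem_cons_of_mem _ hmem)]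
        simpa using h1.trans h2
      · have hih := ih hD'
        rw [if_neg hmem] at hih
        have hnot : x ∉ s :: D' := by
          intro h; rcases List.mem_cons.mp h with h | h
          · exact hxs h
          · exact hmem h
        rw [List.flatMap_cons, if_neg hxs, if_neg hnot, List.flatMap_cons]
        exact List.Perm.append_left _ hih

-- partitioning a filtered scan by key: grouping per distinct key permutes the direct scan
theorem pv_perm_partition (l : List (Int × String)) (D : List String) (hD : D.Nodup) :
    ((l.filter (fun p => decide (p.2 ∈ D))).map (fun p => p.1)).Perm
      (D.flatMap (fun s => (l.filter (fun p => p.2 == s)).map (fun p => p.1))) := by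
  induction l with
  | nil => simp
  | cons p t ih =>
    obtain ⟨i, x⟩ := p
    have hstep :
        (D.flatMap (fun s => (((i, x) :: t).filter (fun q => q.2 == s)).map (fun q => q.1)))
          = D.flatMap (fun s => if x = s then i :: (t.filter (fun q => q.2 == s)).map (fun q => q.1)
              else (t.filter (fun q => q.2 == s)).map (fun q => q.1)) := by
      apply List.flatMap_congr
      intro s _
      by_cases h : x = s <;> simp [h]
    rw [hstep]
    have hmain := pv_flatMap_cons_at D hD x i
      (fun s => (t.filter (fun q => q.2 == s)).map (fun q => q.1))
    by_cases hmem : x ∈ D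
    · rw [if_pos hmem] at hmain
      simp only [List.filter_cons, hmem, decide_true, if_pos, List.map_cons]
      exact (ih.cons i).trans hmain.symm
    · rw [if_neg hmem] at hmain
      simp only [List.filter_cons, hmem, decide_false, Bool.false_eq_true, if_neg,
        not_false_iff]
      exact ih.trans hmain.symm

-- A's loop, closed form
theorem pv_A_eq (a e : List String) (he : e ≠ []) :
    find_source_ranks a e
      = ((PySem.List.enumerate a 1).filter (fun p => e.contains p.2)).map (fun p => p.1) := by
  unfold find_source_ranks
  rw [if_neg he, PySem.List.foldl_append_if]
  simp

-- the inverted index looked up, closed form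
theorem pv_positions_getD (a : List String) (s : String) :
    ((PySem.List.enumerate a 1).foldl
        (fun d p => d.modify p.2 [] (fun l => l ++ [p.1]))
        (PySem.Dict.empty : PySem.Dict String (List Int))).getD s []
      = ((PySem.List.enumerate a 1).filter (fun p => p.2 == s)).map (fun p => p.1) := by
  have hmap : (PySem.List.enumerate a 1).foldl
      (fun d p => d.modify p.2 [] (fun l => l ++ [p.1]))
      (PySem.Dict.empty : PySem.Dict String (List Int))
      = ((PySem.List.enumerate a 1).map (fun p => (p.2, p.1))).foldl
        (fun d q => d.modify q.1 [] (fun l => l ++ [q.2])) PySem.Dict.empty := by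
    rw [List.foldl_map]
  rw [hmap, PySem.Dict.getD_foldl_modify_append]
  simp [PySem.Dict.getD_empty, List.filter_map, Function.comp_def]

-- A's list is strictly increasing
theorem pv_A_pairwise (a e : List String) :
    (((PySem.List.enumerate a 1).filter (fun p => e.contains p.2)).map
        (fun p : Int × String => p.1)).Pairwise (· < ·) := by
  rw [List.pairwise_map]
  exact (PySem.List.pairwise_lt_enumerate a 1).filter _

-- ===== VERDICT (by name: the statement is the Claim_ definition above) =====
theorem find_source_ranks_spec : Claim_equal_find_source_ranks := by
  intro a e _
  unfold Spec_find_source_ranks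
  by_cases he : e = []
  · subst he
    simp [find_source_ranks, find_source_ranks_alt, PySem.List.dedup,
      PySem.List.sorted_eq_nil_iff]
  · unfold find_source_ranks_alt
    set l := PySem.List.enumerate a 1 with hl
    set positions := l.foldl (fun d p => d.modify p.2 [] (fun lst => lst ++ [p.1]))
      (PySem.Dict.empty : PySem.Dict String (List Int)) with hpos
    have hranks : (PySem.List.dedup e).foldl
        (fun r s => match positions.get? s with
          | some v => r ++ v
          | none => r) []
        = (PySem.List.dedup e).flatMap (fun s => positions.getD s []) := by
      have hc : ∀ r s, s ∈ PySem.List.dedup e →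
          (match positions.get? s with
            | some v => r ++ v
            | none => r) = r ++ positions.getD s [] := by
        intro r s _
        cases h : positions.get? s with
        | some v => simp [PySem.Dict.getD_eq_get?_getD, h]
        | none => simp [PySem.Dict.getD_eq_get?_getD, h]
      rw [PySem.List.foldl_congr_mem _ _ (fun r s => r ++ positions.getD s []) _ hc,
        PySem.List.foldl_append_eq_flatMap]
      simp
    simp only [hranks]
    have hgd : (PySem.List.dedup e).flatMap (fun s => positions.getD s [])
        = (PySem.List.dedup e).flatMap (fun s => (l.filter (fun p => p.2 == s)).map (fun p => p.1)) := by
      apply List.flatMap_congr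
      intro s _
      rw [hpos, hl, pv_positions_getD]
    rw [hgd]
    have hperm := pv_perm_partition l (PySem.List.dedup e) (PySem.List.nodup_dedup e)
    have hfilter : (l.filter (fun p => decide (p.2 ∈ PySem.List.dedup e)))
        = l.filter (fun p => e.contains p.2) := by
      apply List.filter_congr
      intro p _
      simp
    rw [hfilter] at hperm
    rw [pv_A_eq a e he, hl]
    exact (PySem.List.sorted_eq_of_perm_of_pairwise_lt _ _ (fun x => x) hperm
      (by simpa using pv_A_pairwise a e)).symm
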